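-- pv_equiv track=rewrite | github.com/pdh9523/TIL_hub | Algorithm/baekjoon/bj_17071.py | dfs
-- ===== SOURCE A (Python) =====
-- from collections import deque
--
-- def in_range(a):
--     return 0<=a<=500000
--
-- def dfs(N,K):
--     if N == K: return 0
--     visit=[[-1,-1] for _ in range(500001)]
--     q = deque([N])
--
--     time=1
--     K += time
--
--     while True:
--         if not in_range(K): break
--
--         next_q=deque()
--
--
--         while q:
--             now = q.popleft()
--
--             for nxt in [now-1, now+1, now*2]:
--
--                 if in_range(nxt) and visit[nxt][time%2]==-1:
--                     visit[nxt][time%2]=time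
--                     next_q.append(nxt)
--
--         if visit[K][time%2] != -1: return time
--
--         time+=1
--         K+=time
--
--         q = next_q
--
--     return -1
-- ===== SOURCE B (Python) =====
-- from collections import deque
--
-- def dfs(N, K):
--     if N == K:
--         return 0
--     L = 500000
--     # brother's in-range trajectory: (t, K + t*(t+1)//2)
--     path = []
--     t, pos = 0, K
--     while True:
--         t += 1
--         pos += t
--         if not 0 <= pos <= L:
--             break
--         path.append((t, pos))
--     if not path:
--         return -1
--     # textbook one-at-a-time FIFO BFS on the flat product graph, state = 2*pos + parity;
--     # the start state is deliberately left unmarked (you may return to it in >0 steps)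
--     dist = [-1] * (2 * L + 2)
--     q = deque([(2 * N, 0)])
--     while q:
--         s, d = q.popleft()
--         pos, par = s // 2, s % 2
--         nd = d + 1
--         for np in (pos - 1, pos + 1, pos * 2):
--             if 0 <= np <= L:
--                 ns = 2 * np + 1 - par
--                 if dist[ns] == -1:
--                     dist[ns] = nd
--                     q.append((ns, nd))
--     # first trajectory time whose state was reached early enough
--     for t, pos in path:
--         d = dist[2 * pos + t % 2]
--         if d != -1 and d <= t:
--             return t
--     return -1
-- ===== Notes on version B (the rewrite author's own statement) =====
-- stated objective: alternative
-- what changed: A interleaves a level-synchronized frontier BFS (deque per level, visit[pos][parity] matrix) with the brother's motion, one BFS level per time step; B instead precomputes the brother's in-range trajectory, runs one stand-alone textbook pop-one FIFO BFS over the flat product graph (state = 2*pos+parity, a single flat dist array, a queue of (state,dist) pairs, start left unmarked), and finally scans the trajectory for the first t with dist[2*K_t+t%2] != -1 and <= t.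
import Mathlib
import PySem

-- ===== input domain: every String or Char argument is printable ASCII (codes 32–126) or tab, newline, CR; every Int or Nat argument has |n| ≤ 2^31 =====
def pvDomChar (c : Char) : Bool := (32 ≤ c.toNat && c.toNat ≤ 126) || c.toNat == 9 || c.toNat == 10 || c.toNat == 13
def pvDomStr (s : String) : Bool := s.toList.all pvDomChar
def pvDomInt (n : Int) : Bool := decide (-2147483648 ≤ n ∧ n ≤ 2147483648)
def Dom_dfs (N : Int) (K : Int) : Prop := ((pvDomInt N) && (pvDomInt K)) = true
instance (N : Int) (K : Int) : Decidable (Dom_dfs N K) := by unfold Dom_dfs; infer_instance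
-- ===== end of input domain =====

set_option maxRecDepth 8000

-- B replaces A's loop that interleaves the brother's motion with a level-synchronized
-- frontier BFS (deque per level, visit[pos][parity] matrix) by: the brother's in-range
-- trajectory precomputed first, one stand-alone textbook pop-one FIFO BFS over the flat
-- product graph (state = 2*pos + parity, one flat dist array, a queue of (state, dist)
-- pairs, start left unmarked), then a scan of the trajectory (objective: alternative).

-- ===== PORT A =====
-- helper in_range(a)
def inRange (a : Int) : Bool := decide (0 ≤ a ∧ a ≤ 500000)

-- visit[p][i] (reads are only ever performed with 0 ≤ p ≤ 500000 and i = time % 2 ∈ {0,1},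
-- so Int.toNat is exact here)
def getV (v : Array (Int × Int)) (p : Int) (i : Int) : Int :=
  let pr := (v[p.toNat]?).getD (-1, -1)
  if i = 0 then pr.1 else pr.2

-- visit[p][i] = x (writes are guarded by in_range p)
def setV (v : Array (Int × Int)) (p : Int) (i : Int) (x : Int) : Array (Int × Int) :=
  v.modify p.toNat (fun pr => if i = 0 then (x, pr.2) else (pr.1, x))

-- body of "for nxt in [now-1, now+1, now*2]": the next_q deque is accumulated reversed
-- (cons instead of append) and reversed once at the end of the level — same queue contents
def tryMark (t : Int) (s : Array (Int × Int) × List Int) (nxt : Int) :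
    Array (Int × Int) × List Int :=
  if inRange nxt && (getV s.1 nxt (t % 2) == -1) then
    (setV s.1 nxt (t % 2) t, nxt :: s.2)
  else s

-- "while q: now = q.popleft(); for nxt in [...]"
def processQ (t : Int) : List Int → Array (Int × Int) → List Int → Array (Int × Int) × List Int
  | [], v, acc => (v, acc.reverse)
  | now :: rest, v, acc =>
      let s := [now - 1, now + 1, now * 2].foldl (tryMark t) (v, acc)
      processQ t rest s.1 s.2

-- visit = [[-1,-1] for _ in range(500001)]
def initVisit : Array (Int × Int) := Array.replicate 500001 (-1, -1)

-- A's "while True" loop; t is the time counter 1,2,3,… (kept as Nat; its Int value is ↑t)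
def loopA (K : Int) (t : Nat) (v : Array (Int × Int)) (q : List Int) : Int :=
  if inRange K then
    let s := processQ (t : Int) q v []
    if getV s.1 K ((t : Int) % 2) ≠ -1 then (t : Int)
    else loopA (K + ((t : Int) + 1)) (t + 1) s.1 s.2
  else -1
termination_by (500001 - K).toNat
decreasing_by
  rename_i h _
  simp only [inRange, decide_eq_true_eq] at h
  omega

def dfs (N : Int) (K : Int) : Int :=
  if N = K then 0 else loopA (K + 1) 1 initVisit [N]

-- ===== PORT B =====
-- "while True: t += 1; pos += t; if not 0 <= pos <= L: break; path.append((t, pos))"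
def buildTs (Kp : Int) (t : Nat) : List (Nat × Int) :=
  if inRange (Kp + ((t : Int) + 1)) then
    (t + 1, Kp + ((t : Int) + 1)) :: buildTs (Kp + ((t : Int) + 1)) (t + 1)
  else []
termination_by (500001 - Kp).toNat
decreasing_by
  rename_i h
  simp only [inRange, decide_eq_true_eq] at h
  omega

-- dist[s] (all reads are at in-range states, so Int.toNat is exact)
def getF (D : Array Int) (s : Int) : Int := (D[s.toNat]?).getD (-1)

-- dist[s] = x
def setF (D : Array Int) (s : Int) (x : Int) : Array Int := D.modify s.toNat (fun _ => x)

-- number of -1 cells, the termination measure of the BFS loop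
def cntF (D : Array Int) : Nat := (D.toList.map (fun x => if x = -1 then 1 else 0)).sum

-- body of "for np in (pos-1, pos+1, pos*2)"; the size test only makes the write total
-- (the array always has size 1000002 and 0 ≤ ns ≤ 1000001 there); q.append pushes the
-- pair onto the back stack of the two-list queue
def popStep (par : Int) (d : Nat) (st : Array Int × List (Int × Nat)) (np : Int) :
    Array Int × List (Int × Nat) :=
  if inRange np then
    let ns := 2 * np + (1 - par)
    if ns.toNat < st.1.size ∧ getF st.1 ns = -1 then
      (setF st.1 ns ((d : Int) + 1), (ns, d + 1) :: st.2)
    else st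
  else st

-- termination helpers for popBFS (cited in its decreasing_by)
theorem sum_map_set {α : Type} (f : α → Nat) :
    ∀ (l : List α) (i : Nat) (x : α) (h : i < l.length),
      ((l.set i x).map f).sum + f l[i] = (l.map f).sum + f x := by
  intro l
  induction l with
  | nil => intro i x h; simp at h
  | cons a l ih =>
      intro i x h
      cases i with
      | zero => simp [List.set]; omega
      | succ i =>
          simp only [List.set, List.map_cons, List.sum_cons, List.getElem_cons_succ]
          have := ih i x (by simpa using h)
          omega

theorem cntF_setF (D : Array Int) (s : Int) (x : Int) (hs : s.toNat < D.size)
    (hold : getF D s = -1) (hx : x ≠ -1) : cntF (setF D s x) + 1 = cntF D := by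
  have hlen : s.toNat < D.toList.length := by simpa using hs
  have hget : D.toList[s.toNat] = -1 := by
    have : D[s.toNat]? = some (D[s.toNat]'hs) := Array.getElem?_eq_getElem hs
    simp only [getF, this, Option.getD_some] at hold
    simpa [Array.getElem_toList] using hold
  have hmod : (setF D s x).toList = D.toList.set s.toNat x := by
    simp [setF, Array.toList_modify, List.modify_eq_set]
  have h := sum_map_set (fun y => if y = -1 then 1 else 0) D.toList s.toNat x hlen
  rw [hget] at h
  simp only [if_neg hx, reduceIte] at h
  unfold cntF
  rw [hmod]
  omega

theorem popStep_measure (par : Int) (d : Nat) (st : Array Int × List (Int × Nat)) (np : Int) :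
    cntF (popStep par d st np).1 + (popStep par d st np).2.length ≤
        cntF st.1 + st.2.length ∧
      cntF (popStep par d st np).1 ≤ cntF st.1 := by
  by_cases hir : inRange np = true
  · by_cases h : ((2 * np + (1 - par)).toNat < st.1.size ∧ getF st.1 (2 * np + (1 - par)) = -1)
    · have heq : popStep par d st np =
          (setF st.1 (2 * np + (1 - par)) ((d : Int) + 1), (2 * np + (1 - par), d + 1) :: st.2) := by
        simp [popStep, hir, h]
      have := cntF_setF st.1 (2 * np + (1 - par)) ((d : Int) + 1) h.1 h.2 (by omega)
      rw [heq]
      simp only [List.length_cons]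
      omega
    · have heq : popStep par d st np = st := by simp [popStep, hir, h]
      rw [heq]
      exact ⟨le_refl _, le_refl _⟩
  · have heq : popStep par d st np = st := by simp [popStep, hir]
    rw [heq]
    exact ⟨le_refl _, le_refl _⟩

theorem foldl_popStep_measure (par : Int) (d : Nat) (l : List Int) :
    ∀ st : Array Int × List (Int × Nat),
      cntF (l.foldl (popStep par d) st).1 + (l.foldl (popStep par d) st).2.length ≤
          cntF st.1 + st.2.length ∧
        cntF (l.foldl (popStep par d) st).1 ≤ cntF st.1 := by
  induction l with
  | nil => intro st; exact ⟨le_refl _, le_refl _⟩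
  | cons a l ih =>
      intro st
      rw [List.foldl_cons]
      have h1 := ih (popStep par d st a)
      have h2 := popStep_measure par d st a
      exact ⟨le_trans h1.1 (by omega), le_trans h1.2 (by omega)⟩

-- "while q: s, d = q.popleft(); …" — Python's deque, realized exactly as the standard
-- two-list functional FIFO queue (queue = front ++ back.reverse; popleft takes the head of
-- front, refilling it from the reversed back stack when it runs empty; append conses onto back)
def popBFS : List (Int × Nat) → List (Int × Nat) → Array Int → Array Int
  | [], [], D => D
  | [], b :: bs, D => popBFS ((b :: bs).reverse) [] D
  | (s, d) :: rest, back, D =>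
      let pos := PySem.Int.floordiv s 2
      let par := PySem.Int.mod s 2
      let st := [pos - 1, pos + 1, pos * 2].foldl (popStep par d) (D, back)
      popBFS rest st.2 st.1
termination_by front back D => 2 * (2 * cntF D + front.length + back.length) + back.length
decreasing_by
  · simp [List.length_reverse]
  · have h := foldl_popStep_measure (PySem.Int.mod s 2) d
      [PySem.Int.floordiv s 2 - 1, PySem.Int.floordiv s 2 + 1, PySem.Int.floordiv s 2 * 2] (D, back)
    have e1 : cntF (D, back).1 = cntF D := rfl
    have e2 : (D, back).2.length = back.length := rfl
    rw [e1, e2] at h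
    simp only [List.length_cons]
    omega

-- dist = [-1] * (2 * L + 2)
def initD : Array Int := Array.replicate 1000002 (-1)

-- "for t, pos in path: d = dist[2*pos + t%2]; if d != -1 and d <= t: return t"
def scanTs (D : Array Int) : List (Nat × Int) → Int
  | [] => -1
  | (t, pos) :: rest =>
      let d := getF D (2 * pos + (t : Int) % 2)
      if d ≠ -1 ∧ d ≤ (t : Int) then (t : Int) else scanTs D rest

def dfs_alt (N : Int) (K : Int) : Int :=
  if N = K then 0
  else
    match buildTs K 0 with
    | [] => -1                                        -- "if not path: return -1"
    | p :: ps => scanTs (popBFS [(2 * N, 0)] [] initD) (p :: ps)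

-- ===== PRECONDITION & SPEC =====
def Spec_dfs (N : Int) (K : Int) (out : Int) : Prop := out = dfs_alt N K
instance (N : Int) (K : Int) (out : Int) : Decidable (Spec_dfs N K out) := by unfold Spec_dfs; infer_instance

-- ===== CLAIM (what is proved, stated in full; the proofs are below) =====
def Claim_equal_dfs : Prop := ∀ (N : Int) (K : Int), Dom_dfs N K → Spec_dfs N K (dfs N K)

-- ===== LEMMAS AND PROOFS =====

-- one whole BFS level applied to a (visit, queue) state
def stepSt (t : Int) (s : Array (Int × Int) × List Int) : Array (Int × Int) × List Int :=
  processQ t s.2 s.1 []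

-- A's BFS state after levels 1..n
def iterSt (N : Int) : Nat → Array (Int × Int) × List Int
  | 0 => (initVisit, [N])
  | n + 1 => stepSt ((n : Int) + 1) (iterSt N n)

lemma getV_congr (v : Array (Int × Int)) {p i p' i' : Int}
    (hp : p.toNat = p'.toNat) (hi : (i = 0) ↔ (i' = 0)) :
    getV v p i = getV v p' i' := by
  simp only [getV, hp]
  by_cases h : i = 0
  · simp [h, hi.mp h]
  · have hi' : ¬ i' = 0 := fun h' => h (hi.mpr h')
    simp [h, hi']

lemma getV_setV (v : Array (Int × Int)) (p' i' x p i : Int) (h : p'.toNat < v.size) :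
    getV (setV v p' i' x) p i =
      if p.toNat = p'.toNat ∧ ((i = 0) ↔ (i' = 0)) then x else getV v p i := by
  simp only [getV, setV]
  rw [Array.getElem?_modify]
  by_cases hp : p.toNat = p'.toNat
  · obtain ⟨pr, hpr⟩ : ∃ pr, v[p.toNat]? = some pr :=
      ⟨_, Array.getElem?_eq_getElem (by omega)⟩
    rw [if_pos hp.symm, hpr]
    by_cases hi' : i' = 0 <;> by_cases hi : i = 0 <;>
      simp [hp, hi, hi', Option.getD]
  · have hp' : ¬ p'.toNat = p.toNat := fun h' => hp h'.symm
    by_cases hi : i = 0 <;> simp [hp', hi, hp]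

lemma getV_init (p i : Int) : getV initVisit p i = -1 := by
  simp only [getV, initVisit]
  by_cases h : p.toNat < 500001
  · simp [h]
  · rw [Array.getElem?_eq_none (by simpa using le_of_not_gt h)]
    simp

lemma size_setV (v : Array (Int × Int)) (p i x : Int) : (setV v p i x).size = v.size := by
  simp [setV]

lemma size_tryMark (t : Int) (s : Array (Int × Int) × List Int) (nxt : Int) :
    (tryMark t s nxt).1.size = s.1.size := by
  unfold tryMark; split <;> simp [size_setV]

lemma size_foldl_tryMark (t : Int) (l : List Int) :
    ∀ s : Array (Int × Int) × List Int, (l.foldl (tryMark t) s).1.size = s.1.size := by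
  induction l with
  | nil => intro s; rfl
  | cons a l ih => intro s; rw [List.foldl_cons, ih, size_tryMark]

lemma size_processQ (t : Int) (q : List Int) :
    ∀ v acc, (processQ t q v acc).1.size = v.size := by
  induction q with
  | nil => intro v acc; rfl
  | cons now rest ih =>
      intro v acc
      show (processQ t rest _ _).1.size = _
      rw [ih]
      exact size_foldl_tryMark t _ (v, acc)

lemma size_iterSt (N : Int) (n : Nat) : (iterSt N n).1.size = 500001 := by
  induction n with
  | zero => simp [iterSt, initVisit]
  | succ n ih => show (processQ _ _ _ _).1.size = _; rw [size_processQ]; exact ih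

-- "the visit array v' extends v, all new marks carrying value t"
def MarkExt (t : Int) (v v' : Array (Int × Int)) : Prop :=
  ∀ p i, getV v' p i = getV v p i ∨ (getV v p i = -1 ∧ getV v' p i = t)

lemma markExt_refl (t : Int) (v : Array (Int × Int)) : MarkExt t v v :=
  fun _ _ => Or.inl rfl

lemma markExt_trans {t : Int} {v v₁ v₂ : Array (Int × Int)}
    (h₁ : MarkExt t v v₁) (h₂ : MarkExt t v₁ v₂) : MarkExt t v v₂ := by
  intro p i
  rcases h₂ p i with h | ⟨hb, hv⟩
  · rcases h₁ p i with h' | ⟨hb', hv'⟩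
    · exact Or.inl (h.trans h')
    · exact Or.inr ⟨hb', h.trans hv'⟩
  · rcases h₁ p i with h' | ⟨hb', hv'⟩
    · exact Or.inr ⟨h' ▸ hb, hv⟩
    · exact Or.inr ⟨hb', hv⟩

lemma markExt_tryMark (t : Int) (s : Array (Int × Int) × List Int) (nxt : Int)
    (hs : s.1.size = 500001) : MarkExt t s.1 (tryMark t s nxt).1 := by
  unfold tryMark
  split
  · rename_i h
    simp only [Bool.and_eq_true, beq_iff_eq, inRange, decide_eq_true_eq] at h
    intro p i
    rw [getV_setV _ _ _ _ _ _ (by rw [hs]; omega)]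
    split
    · rename_i hc
      refine Or.inr ⟨?_, rfl⟩
      rw [getV_congr s.1 hc.1 hc.2]
      exact h.2
    · exact Or.inl rfl
  · exact markExt_refl t s.1

lemma markExt_foldl (t : Int) (l : List Int) :
    ∀ s : Array (Int × Int) × List Int, s.1.size = 500001 →
      MarkExt t s.1 (l.foldl (tryMark t) s).1 := by
  induction l with
  | nil => intro s _; exact markExt_refl t s.1
  | cons a l ih =>
      intro s hs
      rw [List.foldl_cons]
      exact markExt_trans (markExt_tryMark t s a hs)
        (ih _ (by rw [size_tryMark]; exact hs))

lemma markExt_processQ (t : Int) (q : List Int) :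
    ∀ v acc, v.size = 500001 → MarkExt t v (processQ t q v acc).1 := by
  induction q with
  | nil => intro v acc _; exact markExt_refl t v
  | cons now rest ih =>
      intro v acc hv
      show MarkExt t v (processQ t rest _ _).1
      exact markExt_trans (markExt_foldl t _ (v, acc) hv)
        (ih _ _ (by rw [size_foldl_tryMark]; exact hv))

lemma markExt_iterSt (N : Int) (n : Nat) :
    MarkExt ((n : Int) + 1) (iterSt N n).1 (iterSt N (n + 1)).1 :=
  markExt_processQ _ _ _ _ (size_iterSt N n)

-- every mark in the state after n levels is -1 or lies in [1, n]
lemma mark_bounds (N : Int) (n : Nat) (p i : Int) :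
    getV (iterSt N n).1 p i = -1 ∨
      (1 ≤ getV (iterSt N n).1 p i ∧ getV (iterSt N n).1 p i ≤ (n : Int)) := by
  induction n with
  | zero => left; exact getV_init p i
  | succ n ih =>
      rcases markExt_iterSt N n p i with h | ⟨_, hv⟩
      · rw [h]
        rcases ih with h' | h'
        · exact Or.inl h'
        · right
          push_cast at h' ⊢
          omega
      · right
        rw [hv]
        push_cast
        omega

-- truncation: the state after n levels is the state after n+k levels cut at value n
lemma mark_trunc (N : Int) (n : Nat) :
    ∀ (k : Nat) (p i : Int),
      getV (iterSt N n).1 p i =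
        if getV (iterSt N (n + k)).1 p i ≠ -1 ∧ getV (iterSt N (n + k)).1 p i ≤ (n : Int)
        then getV (iterSt N (n + k)).1 p i else -1 := by
  intro k
  induction k with
  | zero =>
      intro p i
      simp only [Nat.add_zero]
      rcases mark_bounds N n p i with h | ⟨h1, h2⟩
      · simp [h]
      · rw [if_pos ⟨by omega, h2⟩]
  | succ k ih =>
      intro p i
      rcases markExt_iterSt N (n + k) p i with h | ⟨hb, hv⟩
      · rw [show n + (k + 1) = (n + k) + 1 from rfl, h]
        exact ih p i
      · rw [show n + (k + 1) = (n + k) + 1 from rfl, hv]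
        rw [if_neg (by push_cast; omega)]
        rw [ih p i, if_neg (by simp [hb])]

-- once the frontier is empty the state never changes again
lemma iterSt_stable (N : Int) (n : Nat) (h : (iterSt N n).2 = []) :
    ∀ k, iterSt N (n + k) = iterSt N n := by
  intro k
  induction k with
  | zero => rfl
  | succ k ih =>
      show stepSt _ (iterSt N (n + k)) = _
      rw [ih, stepSt, h]
      show ((iterSt N n).1, List.reverse []) = iterSt N n
      rw [List.reverse_nil]
      exact Prod.ext rfl h.symm

-- A's reachability test at level n, expressed against the exhausted state
lemma mark_dist (N : Int) (m : Nat) (hm : (iterSt N m).2 = []) (n : Nat) (p i : Int) :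
    (getV (iterSt N n).1 p i ≠ -1) ↔
      (getV (iterSt N m).1 p i ≠ -1 ∧ getV (iterSt N m).1 p i ≤ (n : Int)) := by
  by_cases hnm : n ≤ m
  · have htr := mark_trunc N n (m - n) p i
    rw [show n + (m - n) = m from by omega] at htr
    rw [htr]
    split
    · rename_i hc
      exact iff_of_true hc.1 hc
    · rename_i hc
      exact iff_of_false (by simp) hc
  · have hstab := iterSt_stable N m hm (n - m)
    rw [show m + (n - m) = n from by omega] at hstab
    rw [hstab]
    constructor
    · intro h
      refine ⟨h, ?_⟩
      rcases mark_bounds N m p i with h' | ⟨_, h2⟩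
      · exact absurd h' h
      · omega
    · exact fun h => h.1

-- ===== B-side: correspondence between the flat dist array and A's visit matrix =====

-- flat encoding of the visit matrix: cell 2p+r holds visit[p][r]
def encArr (v : Array (Int × Int)) : Array Int :=
  Array.ofFn (n := 1000002) (fun i =>
    let pr := (v[((i : Nat)) / 2]?).getD (-1, -1)
    if (i : Nat) % 2 = 0 then pr.1 else pr.2)

def encPair (t : Nat) (p : Int) : Int × Nat := (2 * p + (t : Int) % 2, t)

lemma size_encArr (v : Array (Int × Int)) : (encArr v).size = 1000002 := Array.size_ofFn

lemma getF_encArr (v : Array (Int × Int)) (p r : Int) (hp0 : 0 ≤ p) (hp1 : p ≤ 500000)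
    (hr : r = 0 ∨ r = 1) : getF (encArr v) (2 * p + r) = getV v p r := by
  have hi : (2 * p + r).toNat < 1000002 := by omega
  have hdiv : (2 * p + r).toNat / 2 = p.toNat := by omega
  have hmod : (2 * p + r).toNat % 2 = r.toNat := by omega
  simp only [getF, encArr, Array.getElem?_ofFn, dif_pos hi, Option.getD_some]
  simp only [hdiv, hmod, getV]
  rcases hr with h | h <;> simp [h]

lemma setF_encArr (v : Array (Int × Int)) (p r x : Int) (hv : v.size = 500001)
    (hp0 : 0 ≤ p) (hp1 : p ≤ 500000) (hr : r = 0 ∨ r = 1) :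
    setF (encArr v) (2 * p + r) x = encArr (setV v p r x) := by
  apply Array.ext
  · simp [setF, size_encArr]
  · intro j hj1 hj2
    have hj : j < 1000002 := by simpa [setF, size_encArr] using hj1
    have hjd : j / 2 < 500001 := by omega
    obtain ⟨pr, hpr⟩ : ∃ pr, v[j / 2]? = some pr :=
      ⟨_, Array.getElem?_eq_getElem (by omega)⟩
    have hsetq : (setV v p r x)[j / 2]? =
        some (if p.toNat = j / 2 then (if r = 0 then (x, pr.2) else (pr.1, x)) else pr) := by
      simp only [setV, Array.getElem?_modify]
      by_cases he : p.toNat = j / 2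
      · rw [if_pos he, if_pos he, hpr, Option.map_some]
      · rw [if_neg he, if_neg he, hpr]
    have hq : (setF (encArr v) (2 * p + r) x)[j]? = (encArr (setV v p r x))[j]? := by
      simp only [setF, Array.getElem?_modify, encArr, Array.getElem?_ofFn, dif_pos hj, hsetq,
        hpr, Option.getD_some, Option.map_some]
      rcases hr with h | h
      · subst h
        by_cases he : (2 * p + 0).toNat = j
        · have h2 : p.toNat = j / 2 := by omega
          have h3 : j % 2 = 0 := by omega
          have he2 : (2 * p).toNat = j := by omega
          simp [he2, h2, h3]
        · rw [if_neg he]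
          by_cases h2 : p.toNat = j / 2
          · have h3 : ¬ (j % 2 = 0) := by omega
            simp [h2, h3]
          · simp [h2]
      · subst h
        by_cases he : (2 * p + 1).toNat = j
        · have h2 : p.toNat = j / 2 := by omega
          have h3 : ¬ (j % 2 = 0) := by omega
          simp [he, h2, h3]
        · rw [if_neg he]
          by_cases h2 : p.toNat = j / 2
          · have h3 : j % 2 = 0 := by omega
            simp [h2, h3]
          · simp [h2]
    rw [Array.getElem?_eq_getElem hj1, Array.getElem?_eq_getElem hj2] at hq
    exact Option.some.inj hq

-- fold over a list does not look at the accumulated queue (A side: conses)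
lemma foldl_tryMark_acc (t : Int) (l : List Int) :
    ∀ v acc, l.foldl (tryMark t) (v, acc) =
      ((l.foldl (tryMark t) (v, [])).1, (l.foldl (tryMark t) (v, [])).2 ++ acc) := by
  induction l with
  | nil => intro v acc; simp
  | cons a l ih =>
      intro v acc
      simp only [List.foldl_cons]
      by_cases h : (inRange a && (getV v a (t % 2) == -1)) = true
      · rw [show tryMark t (v, acc) a = (setV v a (t % 2) t, a :: acc) from by
            simp [tryMark, h],
          show tryMark t (v, []) a = (setV v a (t % 2) t, [a]) from by
            simp [tryMark, h]]
        rw [ih _ (a :: acc), ih _ [a]]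
        simp
      · rw [show tryMark t (v, acc) a = (v, acc) from by simp [tryMark, h],
          show tryMark t (v, []) a = (v, []) from by simp [tryMark, h]]
        exact ih v acc

-- fold over a list does not look at the accumulated back stack (B side: conses)
lemma foldl_popStep_acc (par : Int) (d : Nat) (l : List Int) :
    ∀ D tail, l.foldl (popStep par d) (D, tail) =
      ((l.foldl (popStep par d) (D, [])).1, (l.foldl (popStep par d) (D, [])).2 ++ tail) := by
  induction l with
  | nil => intro D tail; simp
  | cons a l ih =>
      intro D tail
      simp only [List.foldl_cons]
      by_cases hir : inRange a = true
      · by_cases h : ((2 * a + (1 - par)).toNat < D.size ∧ getF D (2 * a + (1 - par)) = -1)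
        · rw [show popStep par d (D, tail) a =
              (setF D (2 * a + (1 - par)) ((d : Int) + 1), (2 * a + (1 - par), d + 1) :: tail)
              from by simp [popStep, hir, h],
            show popStep par d (D, []) a =
              (setF D (2 * a + (1 - par)) ((d : Int) + 1), [(2 * a + (1 - par), d + 1)])
              from by simp [popStep, hir, h]]
          rw [ih _ ((2 * a + (1 - par), d + 1) :: tail), ih _ [(2 * a + (1 - par), d + 1)]]
          simp
        · rw [show popStep par d (D, tail) a = (D, tail) from by simp [popStep, hir, h],
            show popStep par d (D, []) a = (D, []) from by simp [popStep, hir, h]]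
          exact ih D tail
      · rw [show popStep par d (D, tail) a = (D, tail) from by simp [popStep, hir],
          show popStep par d (D, []) a = (D, []) from by simp [popStep, hir]]
        exact ih D tail

-- one neighbour list processed: B's flat step is A's tryMark step, levels n -> n+1
-- (both push the freshly marked nodes LIFO: tryMark onto acc, popStep onto the back stack)
lemma fold3 (n : Nat) (l : List Int) :
    ∀ v : Array (Int × Int), v.size = 500001 →
      (l.foldl (popStep ((n : Int) % 2) n) (encArr v, [])).1 =
          encArr (l.foldl (tryMark ((n : Int) + 1)) (v, [])).1 ∧
      (l.foldl (popStep ((n : Int) % 2) n) (encArr v, [])).2 =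
          ((l.foldl (tryMark ((n : Int) + 1)) (v, [])).2).map (encPair (n + 1)) := by
  induction l with
  | nil => intro v hv; simp
  | cons a l ih =>
      intro v hv
      simp only [List.foldl_cons]
      have hpar2 : (1 : Int) - (n : Int) % 2 = ((n : Int) + 1) % 2 := by omega
      by_cases hir : inRange a = true
      · have hrange : 0 ≤ a ∧ a ≤ 500000 := by
          simpa [inRange] using hir
        have hrval : ((n : Int) + 1) % 2 = 0 ∨ ((n : Int) + 1) % 2 = 1 := by omega
        have hcond : getF (encArr v) (2 * a + (1 - (n : Int) % 2)) =
            getV v a (((n : Int) + 1) % 2) := by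
          rw [hpar2]
          exact getF_encArr v a _ hrange.1 hrange.2 hrval
        have hsz : (2 * a + (1 - (n : Int) % 2)).toNat < (encArr v).size := by
          rw [size_encArr]; omega
        by_cases h : getV v a (((n : Int) + 1) % 2) = -1
        · -- both mark
          have hb : popStep ((n : Int) % 2) n (encArr v, []) a =
              (setF (encArr v) (2 * a + (1 - (n : Int) % 2)) ((n : Int) + 1),
                [(2 * a + (1 - (n : Int) % 2), n + 1)]) := by
            simp [popStep, hir, hsz, hcond, h]
          have ha : tryMark ((n : Int) + 1) (v, []) a =
              (setV v a (((n : Int) + 1) % 2) ((n : Int) + 1), [a]) := by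
            simp [tryMark, hir, h]
          rw [hb, ha]
          have henc : setF (encArr v) (2 * a + (1 - (n : Int) % 2)) ((n : Int) + 1) =
              encArr (setV v a (((n : Int) + 1) % 2) ((n : Int) + 1)) := by
            rw [hpar2]
            exact setF_encArr v a _ _ hv hrange.1 hrange.2 hrval
          rw [henc]
          set v' := setV v a (((n : Int) + 1) % 2) ((n : Int) + 1) with hv'
          have hv'sz : v'.size = 500001 := by rw [hv', size_setV]; exact hv
          have hBext := foldl_popStep_acc ((n : Int) % 2) n l (encArr v')
            [(2 * a + (1 - (n : Int) % 2), n + 1)]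
          have hAext := foldl_tryMark_acc ((n : Int) + 1) l v' [a]
          rw [hBext, hAext]
          obtain ⟨ih1, ih2⟩ := ih v' hv'sz
          constructor
          · simpa using ih1
          · simp only [List.map_append, List.map_cons, List.map_nil]
            rw [ih2]
            simp [encPair, hpar2]
        · -- both skip
          have hb : popStep ((n : Int) % 2) n (encArr v, []) a = (encArr v, []) := by
            simp [popStep, hir, hcond, h]
          have ha : tryMark ((n : Int) + 1) (v, []) a = (v, []) := by
            simp [tryMark, h]
          rw [hb, ha]
          exact ih v hv
      · have hb : popStep ((n : Int) % 2) n (encArr v, []) a = (encArr v, []) := by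
          simp [popStep, hir]
        have ha : tryMark ((n : Int) + 1) (v, []) a = (v, []) := by
          simp [tryMark, hir]
        rw [hb, ha]
        exact ih v hv

-- decoding a state built as 2p + r
lemma decode_fd (p r : Int) (h0 : 0 ≤ r) (h1 : r < 2) :
    PySem.Int.floordiv (2 * p + r) 2 = p ∧ PySem.Int.mod (2 * p + r) 2 = r := by
  rw [PySem.Int.floordiv_eq_ediv_of_pos (by norm_num),
    PySem.Int.mod_eq_emod_of_pos (by norm_num)]
  omega

-- the pop-one run from A's level-n configuration equals the run from level n+1
lemma sim_q (n : Nat) (qa : List Int) :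
    ∀ (v : Array (Int × Int)) (acc : List Int), v.size = 500001 →
      popBFS (qa.map (encPair n)) (acc.map (encPair (n + 1))) (encArr v) =
        popBFS ((processQ ((n : Int) + 1) qa v acc).2.map (encPair (n + 1))) []
          (encArr ((processQ ((n : Int) + 1) qa v acc).1)) := by
  induction qa with
  | nil =>
      intro v acc hv
      show popBFS [] (acc.map (encPair (n + 1))) (encArr v) =
        popBFS (acc.reverse.map (encPair (n + 1))) [] (encArr v)
      cases acc with
      | nil => rfl
      | cons a as =>
          show popBFS [] ((encPair (n + 1) a) :: as.map (encPair (n + 1))) (encArr v) = _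
          rw [popBFS]
          simp [List.map_reverse]
  | cons now rest ih =>
      intro v acc hv
      have hdec := decode_fd now ((n : Int) % 2) (by omega) (by omega)
      show popBFS ((2 * now + (n : Int) % 2, n) :: _) _ (encArr v) = _
      rw [popBFS]
      simp only [hdec.1, hdec.2]
      rw [foldl_popStep_acc]
      obtain ⟨h1, h2⟩ := fold3 n [now - 1, now + 1, now * 2] v hv
      rw [h1, h2]
      have hT := foldl_tryMark_acc ((n : Int) + 1) [now - 1, now + 1, now * 2] v acc
      have hstep : processQ ((n : Int) + 1) (now :: rest) v acc =
          processQ ((n : Int) + 1) rest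
            ([now - 1, now + 1, now * 2].foldl (tryMark ((n : Int) + 1)) (v, [])).1
            (([now - 1, now + 1, now * 2].foldl (tryMark ((n : Int) + 1)) (v, [])).2 ++ acc) := by
        show processQ ((n : Int) + 1) rest
            ([now - 1, now + 1, now * 2].foldl (tryMark ((n : Int) + 1)) (v, acc)).1
            ([now - 1, now + 1, now * 2].foldl (tryMark ((n : Int) + 1)) (v, acc)).2 = _
        rw [hT]
      rw [hstep]
      dsimp only
      rw [← List.map_append]
      exact ih _ _ (by rw [size_foldl_tryMark]; exact hv)

-- chaining levels: the whole pop-one run lands on any later level's configuration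
lemma chain (N : Int) (m : Nat) :
    popBFS ((iterSt N 0).2.map (encPair 0)) [] (encArr (iterSt N 0).1) =
      popBFS ((iterSt N m).2.map (encPair m)) [] (encArr (iterSt N m).1) := by
  induction m with
  | zero => rfl
  | succ m ih =>
      rw [ih]
      have := sim_q m (iterSt N m).2 (iterSt N m).1 [] (size_iterSt N m)
      simp only [List.map_nil] at this
      rw [this]
      rfl

-- ===== exhaustion: some level has an empty frontier =====

lemma cnt_tryMark (t : Int) (ht : t ≠ -1) (s : Array (Int × Int) × List Int) (a : Int)
    (hs : s.1.size = 500001) :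
    cntF (encArr (tryMark t s a).1) + (tryMark t s a).2.length =
      cntF (encArr s.1) + s.2.length := by
  unfold tryMark
  split
  · rename_i h
    simp only [Bool.and_eq_true, beq_iff_eq, inRange, decide_eq_true_eq] at h
    have hrv : t % 2 = 0 ∨ t % 2 = 1 := by omega
    have henc : encArr (setV s.1 a (t % 2) t) = setF (encArr s.1) (2 * a + t % 2) t :=
      (setF_encArr s.1 a (t % 2) t hs h.1.1 h.1.2 hrv).symm
    have hold : getF (encArr s.1) (2 * a + t % 2) = -1 := by
      rw [getF_encArr s.1 a (t % 2) h.1.1 h.1.2 hrv]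
      exact h.2
    have hbnd : (2 * a + t % 2).toNat < (encArr s.1).size := by
      rw [size_encArr]; omega
    have := cntF_setF (encArr s.1) (2 * a + t % 2) t hbnd hold ht
    simp only [henc, List.length_cons]
    omega
  · rfl

lemma cnt_foldl (t : Int) (ht : t ≠ -1) (l : List Int) :
    ∀ s : Array (Int × Int) × List Int, s.1.size = 500001 →
      cntF (encArr (l.foldl (tryMark t) s).1) + (l.foldl (tryMark t) s).2.length =
        cntF (encArr s.1) + s.2.length := by
  induction l with
  | nil => intro s _; rfl
  | cons a l ih =>
      intro s hs
      rw [List.foldl_cons]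
      rw [ih _ (by rw [size_tryMark]; exact hs)]
      exact cnt_tryMark t ht s a hs

lemma cnt_processQ (t : Int) (ht : t ≠ -1) (q : List Int) :
    ∀ v acc, v.size = 500001 →
      cntF (encArr (processQ t q v acc).1) + (processQ t q v acc).2.length =
        cntF (encArr v) + acc.length := by
  induction q with
  | nil =>
      intro v acc hv
      show cntF (encArr v) + acc.reverse.length = _
      rw [List.length_reverse]
  | cons now rest ih =>
      intro v acc hv
      show cntF (encArr (processQ t rest _ _).1) + (processQ t rest _ _).2.length = _
      rw [ih _ _ (by rw [size_foldl_tryMark]; exact hv)]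
      exact cnt_foldl t ht _ (v, acc) hv

lemma cnt_level (N : Int) (n : Nat) :
    cntF (encArr (iterSt N (n + 1)).1) + (iterSt N (n + 1)).2.length =
      cntF (encArr (iterSt N n).1) := by
  have := cnt_processQ ((n : Int) + 1) (by omega) (iterSt N n).2 (iterSt N n).1 []
    (size_iterSt N n)
  simpa using this

lemma exhaust_aux (N : Int) : ∀ (c n : Nat), cntF (encArr (iterSt N n).1) ≤ c →
    ∃ m, (iterSt N (n + m)).2 = [] := by
  intro c
  induction c with
  | zero =>
      intro n hn
      have := cnt_level N n
      refine ⟨1, ?_⟩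
      have hlen : (iterSt N (n + 1)).2.length = 0 := by omega
      exact List.eq_nil_of_length_eq_zero hlen
  | succ c ih =>
      intro n hn
      by_cases h : (iterSt N (n + 1)).2 = []
      · exact ⟨1, h⟩
      · have hpos : 0 < (iterSt N (n + 1)).2.length := List.length_pos_of_ne_nil h
        have hc := cnt_level N n
        obtain ⟨m, hm⟩ := ih (n + 1) (by omega)
        refine ⟨m + 1, ?_⟩
        rw [show n + (m + 1) = (n + 1) + m from by omega]
        exact hm

lemma exhaust (N : Int) : ∃ m, (iterSt N m).2 = [] := by
  obtain ⟨m, hm⟩ := exhaust_aux N (cntF (encArr (iterSt N 0).1)) 0 (le_refl _)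
  exact ⟨m, by simpa using hm⟩

lemma encArr_init : encArr initVisit = initD := by
  apply Array.ext
  · rw [size_encArr]; simp [initD]
  · intro j hj1 hj2
    have hj : j < 1000002 := by simpa [size_encArr] using hj1
    have hjd : j / 2 < 500001 := by omega
    have hq : (encArr initVisit)[j]? = initD[j]? := by
      simp only [encArr, Array.getElem?_ofFn, dif_pos hj, initVisit, initD,
        Array.getElem?_replicate]
      rcases Nat.mod_two_eq_zero_or_one j with h | h <;> simp [hjd, h, hj]
    rw [Array.getElem?_eq_getElem hj1, Array.getElem?_eq_getElem hj2] at hq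
    exact Option.some.inj hq

-- the full pop-one BFS computes the flat encoding of A's exhausted visit matrix
lemma dist_final (N : Int) : ∃ m, (iterSt N m).2 = [] ∧
    popBFS [(2 * N, 0)] [] initD = encArr (iterSt N m).1 := by
  obtain ⟨m, hm⟩ := exhaust N
  refine ⟨m, hm, ?_⟩
  have h0 : ([N].map (encPair 0)) = [(2 * N, 0)] := by
    simp [encPair]
  have hc := chain N m
  simp only [iterSt] at hc
  rw [h0, encArr_init] at hc
  rw [hc, hm]
  simp [popBFS]

-- ===== the pursuit loop =====

lemma main_loop (N : Int) (m : Nat) (hm : (iterSt N m).2 = []) :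
    ∀ (μ t : Nat) (Kp : Int), μ = (500001 - (Kp + (t : Int) + 1)).toNat →
      loopA (Kp + ((t : Int) + 1)) (t + 1) (iterSt N t).1 (iterSt N t).2 =
        scanTs (encArr (iterSt N m).1) (buildTs Kp t) := by
  intro μ
  induction μ using Nat.strong_induction_on with
  | _ μ ih =>
      intro t Kp hμ
      rw [loopA, buildTs]
      by_cases hin : inRange (Kp + ((t : Int) + 1)) = true
      · rw [if_pos hin, if_pos hin]
        have hinP : (0 : Int) ≤ Kp + ((t : Int) + 1) ∧ Kp + ((t : Int) + 1) ≤ 500000 := by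
          simpa [inRange] using hin
        have hstep : processQ (((t + 1 : Nat)) : Int) (iterSt N t).2 (iterSt N t).1 [] =
            iterSt N (t + 1) := by
          show processQ _ _ _ _ = stepSt ((t : Int) + 1) (iterSt N t)
          rw [stepSt]
          push_cast
          rfl
        rw [hstep]
        have hrv : (((t + 1 : Nat) : Int)) % 2 = 0 ∨ (((t + 1 : Nat) : Int)) % 2 = 1 := by
          omega
        have hgetf : getF (encArr (iterSt N m).1)
              (2 * (Kp + ((t : Int) + 1)) + (((t + 1 : Nat) : Int)) % 2) =
            getV (iterSt N m).1 (Kp + ((t : Int) + 1)) ((((t + 1 : Nat) : Int)) % 2) :=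
          getF_encArr _ _ _ hinP.1 hinP.2 hrv
        have hiff := mark_dist N m hm (t + 1) (Kp + ((t : Int) + 1))
          ((((t + 1 : Nat)) : Int) % 2)
        simp only [scanTs]
        rw [hgetf]
        by_cases hcond :
            getV (iterSt N (t + 1)).1 (Kp + ((t : Int) + 1)) (((t + 1 : Nat) : Int) % 2) ≠ -1
        · rw [if_pos hcond, if_pos (hiff.mp hcond)]
        · rw [if_neg hcond, if_neg (fun hc => hcond (hiff.mpr hc))]
          have hrec := ih ((500001 - ((Kp + ((t : Int) + 1)) + ((t + 1 : Nat) : Int) + 1)).toNat)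
            (by omega) (t + 1) (Kp + ((t : Int) + 1)) (by push_cast; omega)
          push_cast at hrec ⊢
          rw [← hrec]
      · rw [if_neg hin, if_neg hin]
        rfl

-- ===== VERDICT (by name: the statement is the Claim_ definition above) =====
theorem dfs_spec : Claim_equal_dfs := by
  intro N K _dom
  unfold Spec_dfs dfs dfs_alt
  by_cases hNK : N = K
  · simp [hNK]
  · rw [if_neg hNK, if_neg hNK]
    obtain ⟨m, hm, hD⟩ := dist_final N
    have hmain := main_loop N m hm ((500001 - (K + ((0 : Nat) : Int) + 1)).toNat) 0 K rfl
    have h0 : loopA (K + 1) 1 initVisit [N] = scanTs (encArr (iterSt N m).1) (buildTs K 0) := by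
      have := hmain
      push_cast at this
      simpa [iterSt] using this
    rw [h0, hD]
    rcases hpath : buildTs K 0 with _ | ⟨p, ps⟩
    · simp [scanTs]
    · rfl
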